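-- pv_equiv track=rewrite | github.com/SPARKINIFINITY/NYD_2026 | data_ingestion/llm_chunker.py | _group_related_keys
-- ===== SOURCE A (Python) =====
-- from typing import List, Dict, Any, Union
--
-- def _group_related_keys(data: Dict, schema: Dict[str, Any]) -> Dict[str, List[str]]:
--     """Group related keys based on schema analysis"""
--     groups = {'metadata': [], 'content': [], 'identifiers': [], 'other': []}
--
--     for key in data.keys():
--         key_lower = key.lower()
--
--         if any(identifier in key_lower for identifier in ['id', 'uuid', 'key', 'index']):
--             groups['identifiers'].append(key)
--         elif any(meta in key_lower for meta in ['created', 'updated', 'modified', 'timestamp', 'date']):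
--             groups['metadata'].append(key)
--         elif any(content in key_lower for content in ['text', 'content', 'description', 'body', 'message']):
--             groups['content'].append(key)
--         else:
--             groups['other'].append(key)
--
--     # Remove empty groups
--     return {k: v for k, v in groups.items() if v}
-- ===== SOURCE B (Python) =====
-- def _group_related_keys(data, schema):
--     """Group related keys based on schema analysis"""
--     assigned = set()
--
--     def take(substrings):
--         bucket = [k for k in data
--                   if k not in assigned and any(s in k.lower() for s in substrings)]
--         assigned.update(bucket)
--         return bucket
--
--     identifiers = take(('id', 'uuid', 'key', 'index'))
--     metadata = take(('created', 'updated', 'modified', 'timestamp', 'date'))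
--     content = take(('text', 'content', 'description', 'body', 'message'))
--     other = [k for k in data if k not in assigned]
--
--     return {name: bucket for name, bucket in
--             (('metadata', metadata), ('content', content),
--              ('identifiers', identifiers), ('other', other))
--             if bucket}
-- ===== Notes on version B (the rewrite author's own statement) =====
-- stated objective: alternative
-- what changed: Replaces the per-key if/elif classification loop with three priority-ordered category passes that filter the keys against an assigned-set, collecting leftovers as 'other'; same cost, different decomposition.
import Mathlib
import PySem

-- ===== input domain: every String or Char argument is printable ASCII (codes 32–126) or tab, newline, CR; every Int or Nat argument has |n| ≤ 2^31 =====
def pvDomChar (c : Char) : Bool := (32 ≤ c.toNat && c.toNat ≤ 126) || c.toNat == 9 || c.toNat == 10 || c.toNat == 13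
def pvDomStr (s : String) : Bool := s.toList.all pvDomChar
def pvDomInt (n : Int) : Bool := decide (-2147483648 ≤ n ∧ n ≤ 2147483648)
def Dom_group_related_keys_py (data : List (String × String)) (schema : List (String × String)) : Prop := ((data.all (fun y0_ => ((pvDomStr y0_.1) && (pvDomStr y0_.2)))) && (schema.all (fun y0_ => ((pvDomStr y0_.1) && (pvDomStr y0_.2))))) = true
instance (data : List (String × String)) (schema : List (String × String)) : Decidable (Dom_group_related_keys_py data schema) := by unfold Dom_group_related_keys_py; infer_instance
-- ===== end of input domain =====

-- B replaces A's per-key if/elif classification loop with priority-ordered category passes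
-- filtering against an assigned set (objective: alternative decomposition, same cost).


-- ===== PORT A =====
-- A: one pass over the dict's keys, classifying each key with an if/elif chain
-- (identifiers / metadata / content / other); the loop body is the helper pvStepA, the
-- 4-key groups dict is ported as a 4-tuple (metadata, content, identifiers, other);
-- the final comprehension keeps the non-empty groups in the dict's insertion order.
def pvStepA (g : List String × List String × List String × List String) (key : String) :
    List String × List String × List String × List String :=
  let kl := PySem.Str.lower key
  if ["id", "uuid", "key", "index"].any (fun s => PySem.Str.isIn s kl) then
    (g.1, g.2.1, g.2.2.1 ++ [key], g.2.2.2)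
  else if ["created", "updated", "modified", "timestamp", "date"].any (fun s => PySem.Str.isIn s kl) then
    (g.1 ++ [key], g.2.1, g.2.2.1, g.2.2.2)
  else if ["text", "content", "description", "body", "message"].any (fun s => PySem.Str.isIn s kl) then
    (g.1, g.2.1 ++ [key], g.2.2.1, g.2.2.2)
  else
    (g.1, g.2.1, g.2.2.1, g.2.2.2 ++ [key])

def group_related_keys_py (data : List (String × String)) (schema : List (String × String)) : List (String × List String) :=
  let keys := (PySem.Dict.ofList data).keys
  let g := keys.foldl pvStepA ([], [], [], [])
  ([("metadata", g.1), ("content", g.2.1), ("identifiers", g.2.2.1), ("other", g.2.2.2)] : List (String × List String)).filter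
    (fun p => !p.2.isEmpty)

-- ===== PORT B =====
-- B's take(): the keys not yet assigned whose lowercased form contains one of the substrings.
def pvTake (keys : List String) (assigned : PySem.Set String) (subs : List String) : List String :=
  keys.filter (fun k => !(PySem.Set.contains assigned k) &&
    subs.any (fun s => PySem.Str.isIn s (PySem.Str.lower k)))

def group_related_keys_py_alt (data : List (String × String)) (schema : List (String × String)) : List (String × List String) :=
  let keys := (PySem.Dict.ofList data).keys
  let a0 : PySem.Set String := PySem.Set.empty
  let identifiers := pvTake keys a0 ["id", "uuid", "key", "index"]
  let a1 := PySem.Set.update a0 identifiers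
  let metadata := pvTake keys a1 ["created", "updated", "modified", "timestamp", "date"]
  let a2 := PySem.Set.update a1 metadata
  let content := pvTake keys a2 ["text", "content", "description", "body", "message"]
  let a3 := PySem.Set.update a2 content
  let other := keys.filter (fun k => !(PySem.Set.contains a3 k))
  ([("metadata", metadata), ("content", content), ("identifiers", identifiers), ("other", other)] : List (String × List String)).filter
    (fun p => !p.2.isEmpty)

-- ===== PRECONDITION & SPEC =====
def Spec_group_related_keys_py (data : List (String × String)) (schema : List (String × String)) (out : List (String × List String)) : Prop := out = group_related_keys_py_alt data schema
instance (data : List (String × String)) (schema : List (String × String)) (out : List (String × List String)) : Decidable (Spec_group_related_keys_py data schema out) := by unfold Spec_group_related_keys_py; infer_instance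

-- ===== CLAIM (what is proved, stated in full; the proofs are below) =====
def Claim_equal_group_related_keys_py : Prop := ∀ (data : List (String × String)) (schema : List (String × String)), Dom_group_related_keys_py data schema → Spec_group_related_keys_py data schema (group_related_keys_py data schema)

-- ===== LEMMAS AND PROOFS =====
-- the three substring tests, applied to a key
def pvPId (k : String) : Bool :=
  ["id", "uuid", "key", "index"].any (fun s => PySem.Str.isIn s (PySem.Str.lower k))
def pvPMeta (k : String) : Bool :=
  ["created", "updated", "modified", "timestamp", "date"].any (fun s => PySem.Str.isIn s (PySem.Str.lower k))
def pvPCont (k : String) : Bool :=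
  ["text", "content", "description", "body", "message"].any (fun s => PySem.Str.isIn s (PySem.Str.lower k))

theorem stepA_eq (g : List String × List String × List String × List String) (key : String) :
    pvStepA g key =
      if pvPId key then (g.1, g.2.1, g.2.2.1 ++ [key], g.2.2.2)
      else if pvPMeta key then (g.1 ++ [key], g.2.1, g.2.2.1, g.2.2.2)
      else if pvPCont key then (g.1, g.2.1 ++ [key], g.2.2.1, g.2.2.2)
      else (g.1, g.2.1, g.2.2.1, g.2.2.2 ++ [key]) := rfl

-- A's classification fold computes, in each slot, the filter of the keys by the
-- corresponding "first matching branch" predicate.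
theorem foldA_eq_filters (keys : List String) (m c i o : List String) :
    keys.foldl pvStepA (m, c, i, o)
    = (m ++ keys.filter (fun k => !pvPId k && pvPMeta k),
       c ++ keys.filter (fun k => !pvPId k && !pvPMeta k && pvPCont k),
       i ++ keys.filter (fun k => pvPId k),
       o ++ keys.filter (fun k => !pvPId k && !pvPMeta k && !pvPCont k)) := by
  induction keys generalizing m c i o with
  | nil => simp
  | cons k ks ih =>
    rw [List.foldl_cons, stepA_eq]
    rcases Bool.eq_false_or_eq_true (pvPId k) with h1 | h1 <;>
      rcases Bool.eq_false_or_eq_true (pvPMeta k) with h2 | h2 <;>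
        rcases Bool.eq_false_or_eq_true (pvPCont k) with h3 | h3 <;>
          simp [h1, h2, h3, ih]

-- pvTake, with the substring test folded into the named predicate
theorem pvTake_id (keys : List String) (a : PySem.Set String) :
    pvTake keys a ["id", "uuid", "key", "index"]
      = keys.filter (fun k => !(PySem.Set.contains a k) && pvPId k) := rfl
theorem pvTake_meta (keys : List String) (a : PySem.Set String) :
    pvTake keys a ["created", "updated", "modified", "timestamp", "date"]
      = keys.filter (fun k => !(PySem.Set.contains a k) && pvPMeta k) := rfl
theorem pvTake_cont (keys : List String) (a : PySem.Set String) :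
    pvTake keys a ["text", "content", "description", "body", "message"]
      = keys.filter (fun k => !(PySem.Set.contains a k) && pvPCont k) := rfl

theorem take_id (keys : List String) :
    pvTake keys PySem.Set.empty ["id", "uuid", "key", "index"]
      = keys.filter (fun k => pvPId k) := by
  rw [pvTake_id]
  apply List.filter_congr
  intro k _
  simp [PySem.Set.contains, PySem.Set.empty]

theorem take_meta (keys : List String) :
    pvTake keys (PySem.Set.update PySem.Set.empty (keys.filter (fun k => pvPId k)))
        ["created", "updated", "modified", "timestamp", "date"]
      = keys.filter (fun k => !pvPId k && pvPMeta k) := by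
  rw [pvTake_meta]
  apply List.filter_congr
  intro k hk
  have hmem : PySem.Set.contains
      (PySem.Set.update PySem.Set.empty (keys.filter (fun k => pvPId k))) k = pvPId k := by
    rw [Bool.eq_iff_iff, PySem.Set.contains_iff, PySem.Set.mem_update]
    simp [PySem.Set.empty, List.mem_filter, hk]
  rw [hmem]

theorem take_cont (keys : List String) :
    pvTake keys
        (PySem.Set.update (PySem.Set.update PySem.Set.empty (keys.filter (fun k => pvPId k)))
          (keys.filter (fun k => !pvPId k && pvPMeta k)))
        ["text", "content", "description", "body", "message"]
      = keys.filter (fun k => !pvPId k && !pvPMeta k && pvPCont k) := by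
  rw [pvTake_cont]
  apply List.filter_congr
  intro k hk
  have hmem : PySem.Set.contains
      (PySem.Set.update (PySem.Set.update PySem.Set.empty (keys.filter (fun k => pvPId k)))
        (keys.filter (fun k => !pvPId k && pvPMeta k))) k = (pvPId k || pvPMeta k) := by
    rw [Bool.eq_iff_iff, PySem.Set.contains_iff, PySem.Set.mem_update, PySem.Set.mem_update]
    rcases Bool.eq_false_or_eq_true (pvPId k) with h1 | h1 <;>
      rcases Bool.eq_false_or_eq_true (pvPMeta k) with h2 | h2 <;>
        simp [PySem.Set.empty, List.mem_filter, hk, h1, h2]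
  rw [hmem]
  rcases Bool.eq_false_or_eq_true (pvPId k) with h1 | h1 <;>
    rcases Bool.eq_false_or_eq_true (pvPMeta k) with h2 | h2 <;> simp [h1, h2]

theorem take_other (keys : List String) :
    keys.filter (fun k => !(PySem.Set.contains
        (PySem.Set.update
          (PySem.Set.update (PySem.Set.update PySem.Set.empty (keys.filter (fun k => pvPId k)))
            (keys.filter (fun k => !pvPId k && pvPMeta k)))
          (keys.filter (fun k => !pvPId k && !pvPMeta k && pvPCont k))) k))
      = keys.filter (fun k => !pvPId k && !pvPMeta k && !pvPCont k) := by
  apply List.filter_congr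
  intro k hk
  have hmem : PySem.Set.contains
      (PySem.Set.update
        (PySem.Set.update (PySem.Set.update PySem.Set.empty (keys.filter (fun k => pvPId k)))
          (keys.filter (fun k => !pvPId k && pvPMeta k)))
        (keys.filter (fun k => !pvPId k && !pvPMeta k && pvPCont k))) k
      = (pvPId k || pvPMeta k || pvPCont k) := by
    rw [Bool.eq_iff_iff, PySem.Set.contains_iff, PySem.Set.mem_update, PySem.Set.mem_update,
      PySem.Set.mem_update]
    rcases Bool.eq_false_or_eq_true (pvPId k) with h1 | h1 <;>
      rcases Bool.eq_false_or_eq_true (pvPMeta k) with h2 | h2 <;>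
        rcases Bool.eq_false_or_eq_true (pvPCont k) with h3 | h3 <;>
          simp [PySem.Set.empty, List.mem_filter, hk, h1, h2, h3]
  rw [hmem]
  rcases Bool.eq_false_or_eq_true (pvPId k) with h1 | h1 <;>
    rcases Bool.eq_false_or_eq_true (pvPMeta k) with h2 | h2 <;>
      rcases Bool.eq_false_or_eq_true (pvPCont k) with h3 | h3 <;> simp [h1, h2, h3]

-- ===== VERDICT (by name: the statement is the Claim_ definition above) =====
theorem group_related_keys_py_spec : Claim_equal_group_related_keys_py := by
  intro data schema _
  show group_related_keys_py data schema = group_related_keys_py_alt data schema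
  unfold group_related_keys_py group_related_keys_py_alt
  simp only [foldA_eq_filters, take_id, take_meta, take_cont, take_other, List.nil_append]
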